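-- pv_equiv track=rewrite | github.com/0xHardfork/0xHardfork.github.io | .agent/skills/english-learning/scripts/generate_audio.py | assign_voices_to_speakers
-- ===== SOURCE A (Python) =====
-- VOICES = {
--     "en": {
--         "male": [
--             "en-US-GuyNeural",      # Deep, professional male voice
--             "en-US-AndrewNeural",   # Younger, energetic male voice
--         ],
--         "female": [
--             "en-US-JennyNeural",    # Friendly, warm female voice
--             "en-US-AriaNeural",     # Professional, clear female voice
--         ]
--     },
--     "ja": {
--         "male": [
--             "ja-JP-KeitaNeural",    # Natural Japanese male voice
--         ],
--         "female": [
--             "ja-JP-NanamiNeural",   # Natural Japanese female voice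
--             "ja-JP-AoiNeural",      # Alternative Japanese female voice
--         ]
--     }
-- }
--
-- def assign_voices_to_speakers(dialogue_lines, language="en"):
--     """
--     Assign voices to different speakers, alternating male/female.
--
--     Args:
--         dialogue_lines: List of (speaker, text) tuples
--         language: Language code ('en' or 'ja')
--
--     Returns:
--         dict: Mapping of speaker names to voice names
--     """
--     # Extract unique speakers in order of appearance
--     speakers = []
--     seen = set()
--     for speaker, _ in dialogue_lines:
--         if speaker not in seen:
--             speakers.append(speaker)
--             seen.add(speaker)
--
--     voice_pool = VOICES.get(language, VOICES["en"])
--     speaker_voices = {}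
--
--     # Assign voices alternating male/female
--     for idx, speaker in enumerate(speakers):
--         gender = "male" if idx % 2 == 0 else "female"
--         # Use first available voice for each gender
--         voice = voice_pool[gender][0]
--         speaker_voices[speaker] = voice
--
--     return speaker_voices
-- ===== SOURCE B (Python) =====
-- VOICES = {
--     "en": {
--         "male": [
--             "en-US-GuyNeural",      # Deep, professional male voice
--             "en-US-AndrewNeural",   # Younger, energetic male voice
--         ],
--         "female": [
--             "en-US-JennyNeural",    # Friendly, warm female voice
--             "en-US-AriaNeural",     # Professional, clear female voice
--         ]
--     },
--     "ja": {
--         "male": [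
--             "ja-JP-KeitaNeural",    # Natural Japanese male voice
--         ],
--         "female": [
--             "ja-JP-NanamiNeural",   # Natural Japanese female voice
--             "ja-JP-AoiNeural",      # Alternative Japanese female voice
--         ]
--     }
-- }
--
-- def assign_voices_to_speakers(dialogue_lines, language="en"):
--     """Single pass: the result dict itself records which speakers were seen,
--     and its current size gives the male/female parity for a new speaker."""
--     voice_pool = VOICES.get(language, VOICES["en"])
--     speaker_voices = {}
--     for speaker, _ in dialogue_lines:
--         if speaker not in speaker_voices:
--             gender = "male" if len(speaker_voices) % 2 == 0 else "female"
--             speaker_voices[speaker] = voice_pool[gender][0]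
--     return speaker_voices
-- ===== Notes on version B (the rewrite author's own statement) =====
-- stated objective: simpler
-- what changed: B fuses A's two loops (dedup pass building a speakers list plus a seen set, then an enumerate pass assigning voices) into one pass where the result dict itself serves as the seen set and its size gives the parity.
import Mathlib
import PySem

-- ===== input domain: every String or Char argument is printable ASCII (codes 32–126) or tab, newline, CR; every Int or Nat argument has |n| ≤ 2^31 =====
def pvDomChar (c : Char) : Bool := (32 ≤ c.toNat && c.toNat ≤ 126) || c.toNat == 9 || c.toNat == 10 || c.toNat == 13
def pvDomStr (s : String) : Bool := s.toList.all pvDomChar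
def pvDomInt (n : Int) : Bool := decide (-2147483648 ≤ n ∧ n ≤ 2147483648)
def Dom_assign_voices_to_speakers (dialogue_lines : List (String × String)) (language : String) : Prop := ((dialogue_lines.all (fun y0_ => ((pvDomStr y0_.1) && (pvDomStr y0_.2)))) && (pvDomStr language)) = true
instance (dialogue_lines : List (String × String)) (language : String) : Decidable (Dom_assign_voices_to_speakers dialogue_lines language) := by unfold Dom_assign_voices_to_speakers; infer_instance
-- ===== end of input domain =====

-- B is a one-pass fusion of A's two loops (the result dict doubles as the seen set); objective: simpler.

-- ===== PORT A =====
-- module-level constant VOICES (shared by both Python files)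
def pvVOICES : PySem.Dict String (PySem.Dict String (List String)) :=
  PySem.Dict.ofList
    [("en", PySem.Dict.ofList
        [("male", ["en-US-GuyNeural", "en-US-AndrewNeural"]),
         ("female", ["en-US-JennyNeural", "en-US-AriaNeural"])]),
     ("ja", PySem.Dict.ofList
        [("male", ["ja-JP-KeitaNeural"]),
         ("female", ["ja-JP-NanamiNeural", "ja-JP-AoiNeural"])])]

-- VOICES.get(language, VOICES["en"]); the inner getD default is unreachable ("en" is a key of VOICES)
def pvPool (language : String) : PySem.Dict String (List String) :=
  (pvVOICES.get? language).getD (pvVOICES.getD "en" PySem.Dict.empty)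

def assign_voices_to_speakers (dialogue_lines : List (String × String)) (language : String) : List (String × String) :=
  -- loop 1: unique speakers in order of appearance, with a seen set
  let st := dialogue_lines.foldl
    (fun (st : List String × PySem.Set String) line =>
      if PySem.Set.contains st.2 line.1 then st
      else (st.1 ++ [line.1], PySem.Set.add st.2 line.1))
    ([], PySem.Set.empty)
  let speakers := st.1
  let voice_pool := pvPool language
  -- loop 2: for idx, speaker in enumerate(speakers)
  let speaker_voices := (PySem.List.enumerate speakers).foldl
    (fun (d : PySem.Dict String String) p =>
      let gender := if PySem.Int.mod p.1 2 == 0 then "male" else "female"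
      -- voice_pool[gender][0]; both getD defaults are unreachable for these constants
      let voice := (PySem.List.pyGet? (voice_pool.getD gender []) (0 : Int)).getD ""
      d.insert p.2 voice)
    PySem.Dict.empty
  speaker_voices.items

-- ===== PORT B =====
def assign_voices_to_speakers_alt (dialogue_lines : List (String × String)) (language : String) : List (String × String) :=
  let voice_pool := pvPool language
  (dialogue_lines.foldl
    (fun (sv : PySem.Dict String String) line =>
      if sv.contains line.1 then sv
      else
        let gender := if sv.size % 2 == 0 then "male" else "female"
        -- voice_pool[gender][0]; both getD defaults are unreachable for these constants
        sv.insert line.1 ((PySem.List.pyGet? (voice_pool.getD gender []) (0 : Int)).getD ""))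
    PySem.Dict.empty).items

-- ===== PRECONDITION & SPEC =====
def Spec_assign_voices_to_speakers (dialogue_lines : List (String × String)) (language : String) (out : List (String × String)) : Prop := out = assign_voices_to_speakers_alt dialogue_lines language
instance (dialogue_lines : List (String × String)) (language : String) (out : List (String × String)) : Decidable (Spec_assign_voices_to_speakers dialogue_lines language out) := by unfold Spec_assign_voices_to_speakers; infer_instance

-- ===== CLAIM (what is proved, stated in full; the proofs are below) =====
def Claim_equal_assign_voices_to_speakers : Prop := ∀ (dialogue_lines : List (String × String)) (language : String), Dom_assign_voices_to_speakers dialogue_lines language → Spec_assign_voices_to_speakers dialogue_lines language (assign_voices_to_speakers dialogue_lines language)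

-- ===== LEMMAS AND PROOFS =====

-- voice picked for the n-th distinct speaker (proof-side abbreviation)
def pvVoice (pool : PySem.Dict String (List String)) (n : Nat) : String :=
  (PySem.List.pyGet? (pool.getD (if n % 2 == 0 then "male" else "female") []) (0 : Int)).getD ""

-- the dict both programs build from a list of distinct speakers
def pvG (pool : PySem.Dict String (List String)) (l : List String) : PySem.Dict String String :=
  l.foldl (fun d s => d.insert s (pvVoice pool d.size)) PySem.Dict.empty

theorem pvG_keys (pool : PySem.Dict String (List String)) (l : List String) (h : l.Nodup) :
    (pvG pool l).keys = l := by
  unfold pvG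
  rw [PySem.Dict.keys_foldl_insert]
  simp only [PySem.Dict.keys_empty]
  rw [show PySem.Set.update ([] : List String) l = PySem.Set.ofList l from rfl]
  exact PySem.Set.ofList_eq_self_of_nodup l h

theorem pvG_size (pool : PySem.Dict String (List String)) (l : List String) (h : l.Nodup) :
    (pvG pool l).size = l.length := by
  have hk : (pvG pool l).keys = l := pvG_keys pool l h
  have : (pvG pool l).size = (pvG pool l).keys.length := by
    simp [PySem.Dict.size, PySem.Dict.keys]
  rw [this, hk]

theorem pvG_append_singleton (pool : PySem.Dict String (List String)) (l : List String) (s : String) :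
    pvG pool (l ++ [s]) = (pvG pool l).insert s (pvVoice pool (pvG pool l).size) := by
  unfold pvG
  rw [List.foldl_append]
  rfl

theorem pvVoice_natCast (pool : PySem.Dict String (List String)) (n : Nat) :
    (PySem.List.pyGet? (pool.getD (if PySem.Int.mod (n : Int) 2 == 0 then "male" else "female") []) (0 : Int)).getD ""
      = pvVoice pool n := by
  have hm : PySem.Int.mod (n : Int) 2 = ((n % 2 : Nat) : Int) := by
    exact_mod_cast PySem.Int.mod_natCast n 2
  unfold pvVoice
  rw [hm]
  rcases Nat.mod_two_eq_zero_or_one n with h2 | h2 <;> rw [h2] <;> simp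

theorem pvA_assign (pool : PySem.Dict String (List String)) :
    ∀ (ss l : List String), (l ++ ss).Nodup →
    (PySem.List.enumerate ss (l.length : Int)).foldl
      (fun (d : PySem.Dict String String) p =>
        d.insert p.2 ((PySem.List.pyGet? (pool.getD (if PySem.Int.mod p.1 2 == 0 then "male" else "female") []) (0 : Int)).getD ""))
      (pvG pool l)
    = pvG pool (l ++ ss) := by
  intro ss
  induction ss with
  | nil => intro l h; simp [PySem.List.enumerate]
  | cons s ss ih =>
    intro l h
    have hl : l.Nodup := (List.nodup_append.mp (by simpa using h)).1
    rw [PySem.List.enumerate_cons, List.foldl_cons]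
    have hstep :
        (pvG pool l).insert s ((PySem.List.pyGet? (pool.getD (if PySem.Int.mod ((l.length : Int)) 2 == 0 then "male" else "female") []) (0 : Int)).getD "")
          = pvG pool (l ++ [s]) := by
      rw [pvVoice_natCast, pvG_append_singleton, pvG_size pool l hl]
    have hcast : (l.length : Int) + 1 = ((l ++ [s]).length : Int) := by
      simp
    have hnd : ((l ++ [s]) ++ ss).Nodup := by
      simpa [List.append_assoc] using h
    calc (PySem.List.enumerate ss ((l.length : Int) + 1)).foldl
          (fun (d : PySem.Dict String String) p =>
            d.insert p.2 ((PySem.List.pyGet? (pool.getD (if PySem.Int.mod p.1 2 == 0 then "male" else "female") []) (0 : Int)).getD ""))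
          ((pvG pool l).insert s ((PySem.List.pyGet? (pool.getD (if PySem.Int.mod ((l.length : Int)) 2 == 0 then "male" else "female") []) (0 : Int)).getD ""))
        = (PySem.List.enumerate ss (((l ++ [s]).length : Int))).foldl
          (fun (d : PySem.Dict String String) p =>
            d.insert p.2 ((PySem.List.pyGet? (pool.getD (if PySem.Int.mod p.1 2 == 0 then "male" else "female") []) (0 : Int)).getD ""))
          (pvG pool (l ++ [s])) := by rw [hstep, hcast]
      _ = pvG pool ((l ++ [s]) ++ ss) := ih (l ++ [s]) hnd
      _ = pvG pool (l ++ s :: ss) := by rw [List.append_assoc]; rfl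

theorem pvB_fold (pool : PySem.Dict String (List String)) :
    ∀ (dl : List (String × String)) (l : List String), l.Nodup →
    dl.foldl
      (fun (sv : PySem.Dict String String) line =>
        if sv.contains line.1 then sv
        else sv.insert line.1 (((PySem.List.pyGet? (pool.getD (if sv.size % 2 == 0 then "male" else "female") []) (0 : Int)).getD "")))
      (pvG pool l)
    = pvG pool (dl.foldl (fun (u : PySem.Set String) line => PySem.Set.add u line.1) l) := by
  intro dl
  induction dl with
  | nil => intro l h; rfl
  | cons a dl ih =>
    intro l h
    rw [List.foldl_cons, List.foldl_cons]
    have hc : (pvG pool l).contains a.1 = decide (a.1 ∈ l) := by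
      rw [PySem.Dict.contains_eq_decide_mem_keys, pvG_keys pool l h]
    by_cases hm : a.1 ∈ l
    · have : PySem.Set.add l a.1 = l := by simp [PySem.Set.add, hm]
      rw [this]
      simp only [hc, hm, decide_true, if_true]
      exact ih l h
    · have hadd : PySem.Set.add l a.1 = l ++ [a.1] := by simp [PySem.Set.add, hm]
      rw [hadd]
      simp only [hc, hm, decide_false]
      have hins : (pvG pool l).insert a.1
          ((PySem.List.pyGet? (pool.getD (if (pvG pool l).size % 2 == 0 then "male" else "female") []) (0 : Int)).getD "")
          = pvG pool (l ++ [a.1]) := by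
        rw [pvG_append_singleton]
        rfl
      rw [hins]
      refine ih (l ++ [a.1]) ?_
      simp [List.nodup_append, h]
      exact fun x hx hxe => hm (hxe ▸ hx)

theorem pvPair_fold :
    ∀ (dl : List (String × String)) (l : List String),
    dl.foldl
      (fun (st : List String × PySem.Set String) line =>
        if PySem.Set.contains st.2 line.1 then st
        else (st.1 ++ [line.1], PySem.Set.add st.2 line.1))
      (l, l)
    = (dl.foldl (fun (u : PySem.Set String) line => PySem.Set.add u line.1) l,
       dl.foldl (fun (u : PySem.Set String) line => PySem.Set.add u line.1) l) := by
  intro dl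
  induction dl with
  | nil => intro l; rfl
  | cons a dl ih =>
    intro l
    rw [List.foldl_cons, List.foldl_cons]
    by_cases hc : PySem.Set.contains l a.1 = true
    · have hm : a.1 ∈ l := by simpa [PySem.Set.contains] using hc
      have : PySem.Set.add l a.1 = l := by simp [PySem.Set.add, hm]
      simp only [hc, if_true, this]
      exact ih l
    · have hcf : PySem.Set.contains l a.1 = false := by
        cases hb : PySem.Set.contains l a.1
        · rfl
        · exact absurd hb hc
      have hm : a.1 ∉ l := by simpa [PySem.Set.contains] using hcf
      have : PySem.Set.add l a.1 = l ++ [a.1] := by simp [PySem.Set.add, hm]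
      simp only [hcf, Bool.false_eq_true, if_false, this]
      exact ih (l ++ [a.1])

theorem pvU_nodup (dl : List (String × String)) :
    (dl.foldl (fun (u : PySem.Set String) line => PySem.Set.add u line.1) ([] : List String)).Nodup := by
  have : dl.foldl (fun (u : PySem.Set String) line => PySem.Set.add u line.1) ([] : List String)
      = PySem.Set.ofList (dl.map (·.1)) := by
    rw [PySem.Set.ofList_eq_foldl, List.foldl_map]
  rw [this]
  exact PySem.Set.nodup_ofList _

-- ===== VERDICT (by name: the statement is the Claim_ definition above) =====
theorem assign_voices_to_speakers_spec : Claim_equal_assign_voices_to_speakers := by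
  intro dl language _
  unfold Spec_assign_voices_to_speakers
  unfold assign_voices_to_speakers assign_voices_to_speakers_alt
  dsimp only
  rw [show (([] : List String), (PySem.Set.empty : PySem.Set String)) = (([] : List String), ([] : List String)) from rfl]
  rw [pvPair_fold dl []]
  have hA := pvA_assign (pvPool language) (dl.foldl (fun (u : PySem.Set String) line => PySem.Set.add u line.1) []) [] (by simpa using pvU_nodup dl)
  have hB := pvB_fold (pvPool language) dl [] List.nodup_nil
  simp only [List.length_nil, Nat.cast_zero, List.nil_append] at hA
  rw [show (PySem.Dict.empty : PySem.Dict String String) = pvG (pvPool language) [] from rfl]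
  rw [hB, hA]
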